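-- pv_equiv track=rewrite | github.com/Krugger1982/24_1_squirrel | text_recognition.py | LineAnalysis
-- ===== SOURCE A (Python) =====
-- def LineAnalysis(line):
--     if line == '*':
--         return True
--     if line[len(line)-1] != '*' or line[0]  != '*':
--         return False
--     pattern = []
--     for i in range(1, len(line)):
--         if line[i] != '*':
--             pattern.append(line[i])
--         else:
--             break
--     pat = ''.join(pattern)
--     S2 = line.split('*')
--     del S2[0]
--     del S2[-1]
--     result = True
--     for i in range(len(S2)):
--         if (S2[i] != pat):
--             result = False
--             break
--     return result
-- ===== SOURCE B (Python) =====
-- def LineAnalysis(line):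
--     if line[0] != '*' or line[-1] != '*':
--         return False
--     p = line.find('*', 1)
--     if p == -1:
--         return True
--     return all(line[i] == line[i % p] for i in range(len(line)))
-- ===== Notes on version B (the rewrite author's own statement) =====
-- stated objective: alternative
-- what changed: Replaces A's build-pattern-list + split-on-asterisk + segment-by-segment comparison with a modular-index periodicity scan: find the period p (index of the second asterisk) and check line[i] == line[i % p] for every index i.
import Mathlib
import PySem

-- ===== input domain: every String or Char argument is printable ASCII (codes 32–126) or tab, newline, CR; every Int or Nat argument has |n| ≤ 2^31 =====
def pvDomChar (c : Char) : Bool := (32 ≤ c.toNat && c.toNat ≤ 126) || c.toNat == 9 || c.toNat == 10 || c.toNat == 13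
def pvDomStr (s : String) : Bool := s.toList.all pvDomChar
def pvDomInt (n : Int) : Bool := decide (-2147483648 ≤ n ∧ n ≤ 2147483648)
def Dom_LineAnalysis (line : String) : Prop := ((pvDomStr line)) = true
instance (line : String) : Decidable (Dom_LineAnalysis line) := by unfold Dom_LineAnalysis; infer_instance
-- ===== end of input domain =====

-- B replaces A's split-and-compare-segments with a modular-index periodicity scan (alternative decomposition, same cost).
-- Both Pythons raise IndexError on the empty string (excluded by Pre_); equivalence is about the return value.


-- ===== PORT A =====
-- the 'for i in range(1, len(line)): … else break' loop building `pattern`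
def pvPatA (cs : List Char) (i : Nat) : List Char :=
  if h : i < cs.length then
    if cs[i] ≠ '*' then cs[i] :: pvPatA cs (i + 1) else []
  else []
termination_by cs.length - i

-- the 'result = True; for i in range(len(S2)): if S2[i] != pat: result = False; break' loop
def pvCheckSegs (segs : List (List Char)) (pat : List Char) : Bool :=
  match segs with
  | [] => true
  | s :: rest => if s ≠ pat then false else pvCheckSegs rest pat

def LineAnalysis (line : String) : Bool :=
  if line = "*" then true
  else
    match PySem.Str.pyGet? line (PySem.Str.len line - 1), PySem.Str.pyGet? line 0 with
    | some clast, some c0 =>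
      if clast ≠ '*' ∨ c0 ≠ '*' then false
      else
        let pat := pvPatA line.toList 1
        let S2 := PySem.Chars.splitOn line.toList ['*']
        let S2 := S2.drop 1        -- del S2[0]
        let S2 := S2.dropLast      -- del S2[-1]
        pvCheckSegs S2 pat
    | _, _ => false   -- Python raises IndexError here (line = ""); excluded by Pre_

-- ===== PORT B =====
def LineAnalysis_alt (line : String) : Bool :=
  match PySem.Str.pyGet? line 0 with
  | none => false   -- Python raises IndexError here (line = ""); excluded by Pre_
  | some c0 =>
    match PySem.Str.pyGet? line (-1) with
    | none => false
    | some clast =>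
      if c0 ≠ '*' ∨ clast ≠ '*' then false
      else
        let p := PySem.Str.findFrom line "*" 1
        if p = -1 then true
        else
          (PySem.List.pyRange 0 (PySem.Str.len line)).all
            (fun i => PySem.Str.pyGet? line i == PySem.Str.pyGet? line (PySem.Int.mod i p))

-- ===== PRECONDITION & SPEC =====
-- Pre_ excludes only the empty string, on which both A and B raise IndexError.
def Pre_LineAnalysis (line : String) : Prop := line ≠ ""
instance (line : String) : Decidable (Pre_LineAnalysis line) := by unfold Pre_LineAnalysis; infer_instance
def pvWitness_LineAnalysis : String := "*ab*ab*"
def Spec_LineAnalysis (line : String) (out : Bool) : Prop := out = LineAnalysis_alt line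
instance (line : String) (out : Bool) : Decidable (Spec_LineAnalysis line out) := by unfold Spec_LineAnalysis; infer_instance

-- ===== CLAIM (what is proved, stated in full; the proofs are below) =====
def Claim_equal_LineAnalysis : Prop := ∀ (line : String), Dom_LineAnalysis line → Pre_LineAnalysis line → Spec_LineAnalysis line (LineAnalysis line)


-- ===== LEMMAS AND PROOFS =====

-- proof-side model of str.split('*')
def pvConsHead (x : List Char) : List (List Char) → List (List Char)
  | [] => [x]
  | s :: ss => (x ++ s) :: ss

def pvSegs : List Char → List (List Char)
  | [] => [[]]
  | c :: t => if c = '*' then [] :: pvSegs t else pvConsHead [c] (pvSegs t)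

theorem pvConsHead_ne_nil (x : List Char) (r : List (List Char)) : pvConsHead x r ≠ [] := by
  cases r <;> simp [pvConsHead]

theorem pvSegs_ne_nil (l : List Char) : pvSegs l ≠ [] := by
  cases l with
  | nil => simp [pvSegs]
  | cons c t => by_cases h : c = '*' <;> simp [pvSegs, h, pvConsHead_ne_nil]

theorem pvConsHead_nil_of_ne (r : List (List Char)) (h : r ≠ []) : pvConsHead [] r = r := by
  cases r with
  | nil => exact absurd rfl h
  | cons s ss => simp [pvConsHead]

theorem pvConsHead_pvConsHead (x y : List Char) (r : List (List Char)) :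
    pvConsHead x (pvConsHead y r) = pvConsHead (x ++ y) r := by
  cases r <;> simp [pvConsHead]

theorem pv_go_spec (fuel : Nat) (l cur : List Char) (acc : List (List Char))
    (h : l.length < fuel) :
    PySem.Chars.splitOn.go ['*'] fuel l cur acc =
      acc.reverse ++ pvConsHead cur.reverse (pvSegs l) := by
  induction fuel generalizing l cur acc with
  | zero => omega
  | succ n ih =>
    cases l with
    | nil =>
      rw [PySem.Chars.splitOn.go.eq_def]
      simp [pvSegs, pvConsHead]
    | cons c rest =>
      rw [PySem.Chars.splitOn.go.eq_def]
      simp only []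
      by_cases hc : c = '*'
      · subst hc
        have hpre : List.isPrefixOf ['*'] ('*' :: rest) = true := by
          simp [List.isPrefixOf]
        rw [if_pos hpre]
        rw [show List.drop (['*'] : List Char).length ('*' :: rest) = rest from rfl]
        rw [ih rest [] (cur.reverse :: acc) (by simpa using Nat.lt_of_succ_lt_succ h)]
        rw [show ([] : List Char).reverse = [] from rfl, pvConsHead_nil_of_ne _ (pvSegs_ne_nil rest)]
        simp [pvSegs, pvConsHead]
      · have hpre : List.isPrefixOf ['*'] (c :: rest) = false := by
          simp [List.isPrefixOf]
          intro hh; exact hc hh.symm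
        rw [if_neg (by simp [hpre])]
        rw [ih rest (c :: cur) acc (by simpa using Nat.lt_of_succ_lt_succ h)]
        simp [pvSegs, hc, pvConsHead_pvConsHead]

theorem pv_splitOn_eq (l : List Char) :
    PySem.Chars.splitOn l ['*'] = pvSegs l := by
  unfold PySem.Chars.splitOn
  rw [pv_go_spec _ _ _ _ (by omega)]
  simpa using pvConsHead_nil_of_ne _ (pvSegs_ne_nil l)

theorem pvPatA_eq (cs : List Char) (i : Nat) :
    pvPatA cs i = (cs.drop i).takeWhile (fun c => c != '*') := by
  fun_induction pvPatA cs i with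
  | case1 i h hc ih =>
    rw [List.drop_eq_getElem_cons h, List.takeWhile_cons, if_pos (by simpa using hc), ih]
  | case2 i h hc =>
    rw [List.drop_eq_getElem_cons h, List.takeWhile_cons, if_neg (by simpa using hc)]
  | case3 i h =>
    rw [List.drop_eq_nil_of_le (by omega)]
    simp

theorem pvCheckSegs_iff (l : List (List Char)) (pat : List Char) :
    pvCheckSegs l pat = true ↔ ∀ s ∈ l, s = pat := by
  induction l with
  | nil => simp [pvCheckSegs]
  | cons s rest ih =>
    by_cases h : s = pat <;> simp [pvCheckSegs, h, ih]

theorem pvSegs_append (q ts : List Char) (hq : '*' ∉ q) :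
    pvSegs (q ++ '*' :: ts) = q :: pvSegs ts := by
  induction q with
  | nil => simp [pvSegs]
  | cons c q' ih =>
    have hc : c ≠ '*' := fun h => hq (by simp [h])
    have hq' : '*' ∉ q' := fun h => hq (by simp [h])
    simp only [List.cons_append, pvSegs, if_neg hc, ih hq', pvConsHead]
    simp

theorem pvSegs_rep (pat : List Char) (hpat : '*' ∉ pat) (k : Nat) :
    pvSegs ((List.replicate k (pat ++ ['*'])).flatten) = List.replicate k pat ++ [[]] := by
  induction k with
  | zero => simp [pvSegs]
  | succ m ih =>
    rw [List.replicate_succ, List.flatten_cons]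
    rw [List.append_assoc, List.singleton_append, pvSegs_append _ _ hpat, ih]
    simp [List.replicate_succ]

-- first-'*' decomposition of a list containing '*'
theorem pv_decomp (ws : List Char) (hmem : '*' ∈ ws) :
    ws = (ws.takeWhile (fun c => c != '*')) ++ '*' :: (ws.dropWhile (fun c => c != '*')).tail := by
  have hd : ws.dropWhile (fun c => c != '*') ≠ [] := by
    intro h
    have := List.takeWhile_append_dropWhile (p := fun c => c != '*') (l := ws)
    rw [h, List.append_nil] at this
    rw [← this] at hmem
    have := List.mem_takeWhile_imp hmem
    simp at this
  have hh : (ws.dropWhile (fun c => c != '*')).head hd = '*' := by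
    have := List.head_dropWhile_not (fun c => c != '*') hd
    simpa using this
  have hdec : ws.dropWhile (fun c => c != '*') = '*' :: (ws.dropWhile (fun c => c != '*')).tail := by
    conv_lhs => rw [← List.cons_head_tail hd]
    rw [hh]
  conv_lhs => rw [← List.takeWhile_append_dropWhile (p := fun c => c != '*') (l := ws), hdec]

theorem pv_takeWhile_no_star (ws : List Char) : '*' ∉ ws.takeWhile (fun c => c != '*') := by
  intro h
  have := List.mem_takeWhile_imp h
  simp at this

-- A's split-and-compare check, forward direction (strong induction on the word)
theorem pv_A_fwd (N : Nat) : ∀ (ws pat : List Char), ws.length ≤ N → ws.getLast? = some '*' →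
    pvCheckSegs (pvSegs ws).dropLast pat = true →
    ∃ k, ws = (List.replicate k (pat ++ ['*'])).flatten := by
  induction N with
  | zero =>
    intro ws pat hlen hlast _
    obtain ⟨ys, rfl⟩ := List.getLast?_eq_some_iff.mp hlast
    simp at hlen
  | succ N ih =>
    intro ws pat hlen hlast hchk
    have hmem : '*' ∈ ws := by
      obtain ⟨ys, rfl⟩ := List.getLast?_eq_some_iff.mp hlast
      simp
    set q := ws.takeWhile (fun c => c != '*') with hq
    set ts := (ws.dropWhile (fun c => c != '*')).tail with hts
    have hdec : ws = q ++ '*' :: ts := pv_decomp ws hmem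
    have hsegs : pvSegs ws = q :: pvSegs ts := by
      rw [hdec]; exact pvSegs_append q ts (pv_takeWhile_no_star ws)
    by_cases hts0 : ts = []
    · rw [hts0] at hsegs hdec
      rw [hsegs] at hchk
      simp only [pvSegs] at hchk
      simp only [List.dropLast] at hchk
      unfold pvCheckSegs at hchk
      have hqp : q = pat := by
        by_cases h : q = pat
        · exact h
        · rw [if_pos h] at hchk; exact absurd hchk (by simp)
      exact ⟨1, by simp [hdec, hqp]⟩
    · have hlast' : ts.getLast? = some '*' := by
        rw [hdec, show q ++ '*' :: ts = (q ++ ['*']) ++ ts by simp, List.getLast?_append] at hlast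
        cases hts' : ts.getLast? with
        | none => exact absurd (List.getLast?_eq_none_iff.mp hts') hts0
        | some x =>
          rw [hts'] at hlast
          simpa using hlast
      obtain ⟨ss, hps⟩ : ∃ ss, pvSegs ts = ss ∧ ss ≠ [] := ⟨pvSegs ts, rfl, pvSegs_ne_nil ts⟩
      obtain ⟨hps, hss⟩ := hps
      cases ss with
      | nil => exact absurd hps (by simpa using hss)
      | cons s2 ss2 =>
        rw [hsegs, hps, List.dropLast_cons₂] at hchk
        unfold pvCheckSegs at hchk
        have hqp : q = pat := by
          by_cases h : q = pat
          · exact h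
          · rw [if_pos h] at hchk; exact absurd hchk (by simp)
        rw [if_neg (by simp [hqp])] at hchk
        have hlen' : ts.length ≤ N := by
          have := congrArg List.length hdec
          simp at this
          omega
        obtain ⟨k, hk⟩ := ih ts pat hlen' hlast' (by rw [hps]; exact hchk)
        refine ⟨k + 1, ?_⟩
        rw [hdec, hqp, hk, List.replicate_succ, List.flatten_cons]
        simp

theorem pv_A_char (ws pat : List Char) (hlast : ws.getLast? = some '*')
    (hpat : pat = ws.takeWhile (fun c => c != '*')) :
    (pvCheckSegs (pvSegs ws).dropLast pat = true ↔
      ∃ k, ws = (List.replicate k (pat ++ ['*'])).flatten) := by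
  constructor
  · exact fun h => pv_A_fwd ws.length ws pat le_rfl hlast h
  · rintro ⟨k, rfl⟩
    have hnp : '*' ∉ pat := by rw [hpat]; exact pv_takeWhile_no_star _
    rw [pvSegs_rep pat hnp k, List.dropLast_concat, pvCheckSegs_iff]
    intro s hs
    exact (List.eq_of_mem_replicate hs)

-- getElem? of a flattened replicate
theorem pv_flat_get (b : List Char) (k i : Nat) (h : i < k * b.length) :
    ((List.replicate k b).flatten)[i]? = b[i % b.length]? := by
  induction k generalizing i with
  | zero => omega
  | succ m ih =>
    rw [List.replicate_succ, List.flatten_cons]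
    by_cases hi : i < b.length
    · rw [List.getElem?_append_left hi, Nat.mod_eq_of_lt hi]
    · have hmul : (m + 1) * b.length = m * b.length + b.length := by ring
      rw [List.getElem?_append_right (by omega)]
      have h2 : i - b.length < m * b.length := by omega
      rw [ih _ h2]
      congr 1
      exact (Nat.mod_eq_sub_mod (by omega)).symm

theorem pv_flat_len (b : List Char) (k : Nat) :
    ((List.replicate k b).flatten).length = k * b.length := by
  induction k with
  | zero => simp
  | succ m ih => rw [List.replicate_succ, List.flatten_cons]; simp [ih]; ring

theorem pv_shift (pat : List Char) (k : Nat) :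
    (List.replicate k (('*' :: pat) : List Char)).flatten ++ ['*'] =
      '*' :: (List.replicate k (pat ++ ['*'])).flatten := by
  induction k with
  | zero => simp
  | succ m ih =>
    rw [List.replicate_succ, List.flatten_cons, List.replicate_succ, List.flatten_cons]
    simp only [List.cons_append, List.append_assoc, ih]
    simp

def pvPeriodic (cs : List Char) (p : Nat) : Prop := ∀ i < cs.length, cs[i]? = cs[i % p]?

-- str.find: index of the first '*' = length of the maximal star-free prefix
theorem pv_find_eq (ws : List Char) (hmem : '*' ∈ ws) :
    PySem.Chars.find ws ['*'] = (((ws.takeWhile (fun c => c != '*')).length : Nat) : Int) := by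
  have hinfix : ['*'] <:+: ws := by
    obtain ⟨s, t, rfl⟩ := List.append_of_mem hmem
    exact ⟨s, t, by simp⟩
  have hne : PySem.Chars.find ws ['*'] ≠ -1 := (PySem.Chars.find_ne_neg_one_iff ws ['*']).mpr hinfix
  have h0 : 0 ≤ PySem.Chars.find ws ['*'] := by
    have := PySem.Chars.neg_one_le_find ws ['*']
    omega
  obtain ⟨hpre, hmin⟩ := PySem.Chars.find_spec h0
  set f := (PySem.Chars.find ws ['*']).toNat with hf
  set t := ws.takeWhile (fun c => c != '*') with ht
  have hws : ws[f]? = some '*' := by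
    obtain ⟨tl, htl⟩ := hpre
    rw [← List.head?_drop, ← htl]
    rfl
  have h1 : ∀ j, j < t.length → ws[j]? ≠ some '*' := by
    intro j hj hcon
    have hpfx : t = List.take t.length ws := List.prefix_iff_eq_take.mp (List.takeWhile_prefix _)
    have : t[j]? = some '*' := by rw [hpfx, List.getElem?_take, if_pos hj]; exact hcon
    exact pv_takeWhile_no_star ws (ht ▸ List.mem_of_getElem? this)
  have hdrop : List.drop t.length ws = '*' :: (ws.dropWhile (fun c => c != '*')).tail := by
    conv_lhs => rw [pv_decomp ws hmem]
    exact List.drop_left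
  have hge : t.length ≤ f := by
    by_contra hlt
    apply h1 f (by omega) hws
  have hle : f ≤ t.length := by
    by_contra hlt
    exact hmin t.length (by omega) ⟨_, hdrop.symm⟩
  have hft : f = t.length := le_antisymm hle hge
  rw [← hft, hf, Int.toNat_of_nonneg h0]

theorem pv_B_char (rest pat : List Char) (hlast : rest.getLast? = some '*')
    (hpat : pat = rest.takeWhile (fun c => c != '*')) :
    (pvPeriodic ('*' :: rest) (pat.length + 1) ↔
      ∃ k, rest = (List.replicate k (pat ++ ['*'])).flatten) := by
  set cs : List Char := '*' :: rest with hcs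
  set p : Nat := pat.length + 1 with hp
  have hp0 : 0 < p := by omega
  have hrne : rest ≠ [] := by
    intro h; rw [h] at hlast; simp at hlast
  have hn : cs.length = rest.length + 1 := by simp [hcs]
  have hpn : p ≤ cs.length := by
    have : pat.length ≤ rest.length := by
      rw [hpat]
      exact (List.takeWhile_prefix _).length_le
    omega
  have hblen : (('*' :: pat) : List Char).length = p := by simp [hp]
  have htake : cs.take p = '*' :: pat := by
    rw [hcs, hp, List.take_succ_cons]
    congr 1
    have : pat <+: rest := hpat ▸ List.takeWhile_prefix _
    exact (List.prefix_iff_eq_take.mp this).symm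
  have hsmall : ∀ j, j < p → cs[j]? = ('*' :: pat)[j]? := by
    intro j hj
    rw [← htake, List.getElem?_take, if_pos hj]
  have keyOf : ∀ k, cs.length = k * p + 1 →
      cs = (List.replicate k (('*' :: pat) : List Char)).flatten ++ ['*'] →
      ∀ j, j < cs.length → cs[j]? = ('*' :: pat)[j % p]? := by
    intro k hck hceq j hj
    have hflen : ((List.replicate k (('*' :: pat) : List Char)).flatten).length = k * p := by
      rw [pv_flat_len, hblen]
    rcases Nat.lt_or_ge j (k * p) with hlt | hge
    · rw [hceq, List.getElem?_append_left (by rw [hflen]; exact hlt)]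
      have := pv_flat_get ('*' :: pat) k j (by rw [hblen]; exact hlt)
      rw [hblen] at this
      exact this
    · have hjeq : j = k * p := by omega
      rw [hceq, List.getElem?_append_right (by rw [hflen]; omega), hflen, hjeq, Nat.sub_self,
        Nat.mul_mod_left]
      rfl
  constructor
  · -- periodicity → replicated structure
    intro hper
    have hstar0 : ∀ j, j < p → cs[j]? = some '*' → j = 0 := by
      intro j hj hcon
      rw [hsmall j hj] at hcon
      cases j with
      | zero => rfl
      | succ m =>
        exfalso
        simp only [List.getElem?_cons_succ] at hcon
        exact (hpat ▸ pv_takeWhile_no_star rest) (List.mem_of_getElem? hcon)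
    have hlastc : cs[cs.length - 1]? = some '*' := by
      rw [← List.getLast?_eq_getElem?, hcs,
        show ('*' :: rest : List Char) = ['*'] ++ rest by rfl, List.getLast?_append, hlast]
      rfl
    have hmod0 : (cs.length - 1) % p = 0 := by
      have h1 := hper (cs.length - 1) (by omega)
      rw [hlastc] at h1
      exact hstar0 _ (Nat.mod_lt _ hp0) h1.symm
    obtain ⟨k, hk⟩ := Nat.dvd_of_mod_eq_zero hmod0
    rw [Nat.mul_comm] at hk
    have hck : cs.length = k * p + 1 := by omega
    refine ⟨k, ?_⟩
    have hflen : ((List.replicate k (('*' :: pat) : List Char)).flatten).length = k * p := by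
      rw [pv_flat_len, hblen]
    have hceq : cs = (List.replicate k (('*' :: pat) : List Char)).flatten ++ ['*'] := by
      apply List.ext_getElem?
      intro i
      by_cases hi : i < cs.length
      · have hstep : ((List.replicate k (('*' :: pat) : List Char)).flatten ++ ['*'])[i]? = ('*' :: pat)[i % p]? := by
          rcases Nat.lt_or_ge i (k * p) with hlt | hge
          · rw [List.getElem?_append_left (by rw [hflen]; exact hlt)]
            have := pv_flat_get ('*' :: pat) k i (by rw [hblen]; exact hlt)
            rw [hblen] at this
            exact this
          · have hieq : i = k * p := by omega
            rw [List.getElem?_append_right (by rw [hflen]; omega), hflen, hieq, Nat.sub_self,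
              Nat.mul_mod_left]
            rfl
        rw [hstep, hper i hi, hsmall (i % p) (Nat.mod_lt _ hp0)]
      · rw [List.getElem?_eq_none (by omega),
          List.getElem?_eq_none (by rw [List.length_append, hflen]; simp; omega)]
    rw [pv_shift] at hceq
    have : '*' :: rest = '*' :: (List.replicate k (pat ++ ['*'])).flatten := hcs.symm.trans hceq
    exact (List.cons_eq_cons.mp this).2
  · -- replicated structure → periodicity
    rintro ⟨k, hk⟩
    have hceq : cs = (List.replicate k (('*' :: pat) : List Char)).flatten ++ ['*'] := by
      rw [pv_shift, hcs, hk]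
    have hck : cs.length = k * p + 1 := by
      rw [hceq, List.length_append, pv_flat_len, hblen]
      rfl
    intro i hi
    rw [keyOf k hck hceq i hi, keyOf k hck hceq (i % p) (by have := Nat.mod_le i p; omega),
      Nat.mod_mod_of_dvd i (dvd_refl p)]
-- bridge from B's Bool all-scan over pyRange to the periodicity proposition
theorem pv_B_all (cs : List Char) (p : Nat) (hp : 0 < p) :
    ((PySem.List.pyRange 0 ((cs.length : Nat) : Int) 1).all
       (fun i => PySem.Chars.pyGet? cs i == PySem.Chars.pyGet? cs (PySem.Int.mod i ((p : Nat) : Int))) = true)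
      ↔ pvPeriodic cs p := by
  rw [show PySem.List.pyRange 0 ((cs.length : Nat) : Int) 1 = PySem.List.pyRange 0 ((cs.length : Nat) : Int) from rfl]
  rw [PySem.List.pyRange_zero_natCast, List.all_map, List.all_eq_true]
  unfold pvPeriodic
  constructor
  · intro h i hi
    have := h i (List.mem_range.mpr hi)
    simp only [Function.comp] at this
    rw [show PySem.Int.mod (i : Int) ((p : Nat) : Int) = (((i % p : Nat) : Nat) : Int) by
          unfold PySem.Int.mod
          rw [Int.fmod_eq_emod]
          push_cast
          simp] at this
    rw [show PySem.Chars.pyGet? = PySem.List.pyGet? (α := Char) from rfl] at this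
    rw [PySem.List.pyGet?_natCast, PySem.List.pyGet?_natCast] at this
    exact eq_of_beq this
  · intro h i hi
    have hi' := List.mem_range.mp hi
    simp only [Function.comp]
    rw [show PySem.Int.mod (i : Int) ((p : Nat) : Int) = (((i % p : Nat) : Nat) : Int) by
          unfold PySem.Int.mod
          rw [Int.fmod_eq_emod]
          push_cast
          simp]
    rw [show PySem.Chars.pyGet? = PySem.List.pyGet? (α := Char) from rfl]
    rw [PySem.List.pyGet?_natCast, PySem.List.pyGet?_natCast]
    exact beq_of_eq (h i hi')

-- ===== VERDICT (by name: the statement is the Claim_ definition above) =====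
theorem LineAnalysis_spec : Claim_equal_LineAnalysis := by
  intro line _ hpre
  unfold Spec_LineAnalysis
  by_cases hstar : line = "*"
  · subst hstar
    decide
  · have hcs : line.toList ≠ [] := by
      intro h
      exact hpre (String.ext (h.trans rfl))
    cases hl : line.toList with
    | nil => exact absurd hl hcs
    | cons c rest =>
      have hlst0 : (c :: rest : List Char) ≠ [] := by simp
      obtain ⟨lst, hlast?⟩ : ∃ l, (c :: rest).getLast? = some l :=
        ⟨_, List.getLast?_eq_some_getLast hlst0⟩
      have hget0 : PySem.Str.pyGet? line 0 = some c := by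
        rw [PySem.Str.pyGet?_eq, hl]
        show PySem.List.pyGet? _ _ = _
        rw [PySem.List.pyGet?_zero_cons]
      have hgetneg : PySem.Str.pyGet? line (-1) = some lst := by
        rw [PySem.Str.pyGet?_eq, hl]
        show PySem.List.pyGet? _ _ = _
        rw [PySem.List.pyGet?_neg_one, hlast?]
      have hgetlen : PySem.Str.pyGet? line (PySem.Str.len line - 1) = some lst := by
        rw [PySem.Str.pyGet?_eq, PySem.Str.len, hl]
        show PySem.List.pyGet? _ _ = _
        rw [show ((c :: rest : List Char).length : Int) - 1 = ((rest.length : Nat) : Int) by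
              simp]
        rw [PySem.List.pyGet?_natCast]
        rw [show (c :: rest)[rest.length]? = (c :: rest).getLast? by
              rw [List.getLast?_eq_getElem?]; simp]
        rw [hlast?]
      unfold LineAnalysis LineAnalysis_alt
      rw [if_neg hstar, hget0, hgetneg, hgetlen]
      dsimp only
      by_cases hc : c = '*'
      · by_cases hlsteq : lst = '*'
        · subst hc hlsteq
          rw [if_neg (by simp), if_neg (by simp)]
          have hrne : rest ≠ [] := by
            intro h
            rw [h] at hl
            exact hstar (String.ext (hl.trans rfl))
          have hlastr : rest.getLast? = some '*' := by
            have hcr : ('*' :: rest : List Char).getLast? = rest.getLast? := by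
              rw [show ('*' :: rest : List Char) = ['*'] ++ rest from rfl, List.getLast?_append,
                List.getLast?_eq_some_getLast hrne]
              rfl
            rw [← hcr, hlast?]
          have hmem : '*' ∈ rest := by
            obtain ⟨ys, hy⟩ := List.getLast?_eq_some_iff.mp hlastr
            rw [hy]; simp
          set pat := rest.takeWhile (fun ch => ch != '*') with hpatdef
          have hpatA : pvPatA line.toList 1 = pat := by
            rw [hl, pvPatA_eq]
            simp [hpatdef]
          have hsplit : (PySem.Chars.splitOn line.toList ['*']).drop 1 = pvSegs rest := by
            rw [hl, pv_splitOn_eq]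
            simp [pvSegs]
          have hff : PySem.Str.findFrom line "*" 1 = ((pat.length : Nat) : Int) + 1 := by
            rw [PySem.Str.findFrom_eq, hl, show "*".toList = ['*'] from rfl]
            rw [show (1 : Int) = ((1 : Nat) : Int) from rfl]
            rw [PySem.Chars.findFrom_natCast _ _ 1 (by simp)]
            rw [show List.drop 1 ('*' :: rest) = rest from rfl]
            rw [pv_find_eq rest hmem]
            rw [if_neg (by omega)]
            push_cast
            ring
          simp only [hpatA, hsplit, hff]
          rw [if_neg (by omega)]
          rw [Bool.eq_iff_iff]
          rw [pvCheckSegs_iff]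
          rw [show ((pat.length : Nat) : Int) + 1 = (((pat.length + 1 : Nat)) : Int) by push_cast; ring]
          have hall := pv_B_all line.toList (pat.length + 1) (by omega)
          rw [hl] at hall
          simp only [PySem.Str.pyGet?_eq, PySem.Str.len, hl]
          rw [show PySem.Chars.pyGet? = PySem.List.pyGet? (α := Char) from rfl] at hall ⊢
          rw [hall]
          rw [← pvCheckSegs_iff]
          rw [pv_A_char rest pat hlastr hpatdef, pv_B_char rest pat hlastr hpatdef]
        · rw [if_pos (by simp [hlsteq]), if_pos (by simp [hlsteq])]
      · rw [if_pos (by simp [hc]), if_pos (by simp [hc])]
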